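-- pv_equiv track=rewrite | github.com/student-kshitish/solar-ring-memory | benchmarks/winograd_spring.py | extract_key_entity
-- ===== SOURCE A (Python) =====
-- _STOPWORDS = {
--     'the','a','an','this','that','these','those',
--     'is','was','were','are','be','been','being',
--     'had','has','have','did','do','does',
--     'too','very','so','just','also','not',
--     'and','or','but','for','with','from',
--     'its','his','her','their','our','my','your',
--     'in','on','at','to','of','by','as',
--     'it','he','she','they','who','which',
-- }
--
-- def extract_key_entity(phrase: str, ctx: str) -> str:
--     """
--     Extract the key entity word from a Winograd completion.
--
--     Examples:
--     "The trophy was too big."    → "trophy"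
--     "The suitcase was too small." → "suitcase"
--     "Susan had given help."      → "Susan"
--
--     Strategy: first content word in phrase that also appears in ctx,
--     skipping stopwords and articles.
--     """
--     ctx_words    = set(ctx.lower().split())
--     phrase_words = phrase.lower().split()
--
--     for w in phrase_words:
--         w_clean = w.rstrip('.,;')
--         if (w_clean not in _STOPWORDS
--                 and len(w_clean) > 2
--                 and w_clean in ctx_words):
--             return w_clean
--
--     # Fallback: first non-stopword content word in phrase
--     for w in phrase_words:
--         w_clean = w.rstrip('.,;')
--         if w_clean not in _STOPWORDS and len(w_clean) > 2:
--             return w_clean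
--
--     return phrase_words[0].rstrip('.,;') if phrase_words else ''
-- ===== SOURCE B (Python) =====
-- _STOPWORDS = {
--     'the','a','an','this','that','these','those',
--     'is','was','were','are','be','been','being',
--     'had','has','have','did','do','does',
--     'too','very','so','just','also','not',
--     'and','or','but','for','with','from',
--     'its','his','her','their','our','my','your',
--     'in','on','at','to','of','by','as',
--     'it','he','she','they','who','which',
-- }
--
-- def extract_key_entity(phrase: str, ctx: str) -> str:
--     # Single backward pass: walk the words right-to-left, overwriting the two
--     # accumulator slots so that the leftmost candidate of each tier survives.
--     ctx_words = set(ctx.lower().split())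
--     words = phrase.lower().split()
--     best_ctx = None       # leftmost content word that appears in ctx
--     best_content = None   # leftmost content word
--     for w in reversed(words):
--         c = w.rstrip('.,;')
--         if c not in _STOPWORDS and len(c) > 2:
--             best_content = c
--             if c in ctx_words:
--                 best_ctx = c
--     if best_ctx is not None:
--         return best_ctx
--     if best_content is not None:
--         return best_content
--     return words[0].rstrip('.,;') if words else ''
-- ===== Notes on version B (the rewrite author's own statement) =====
-- stated objective: alternative
-- what changed: B makes a single right-to-left pass over the phrase words with a two-slot accumulator (leftmost winners survive by overwriting), replacing A's two separate forward rescans that each re-clean and re-test every word.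
import Mathlib
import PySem

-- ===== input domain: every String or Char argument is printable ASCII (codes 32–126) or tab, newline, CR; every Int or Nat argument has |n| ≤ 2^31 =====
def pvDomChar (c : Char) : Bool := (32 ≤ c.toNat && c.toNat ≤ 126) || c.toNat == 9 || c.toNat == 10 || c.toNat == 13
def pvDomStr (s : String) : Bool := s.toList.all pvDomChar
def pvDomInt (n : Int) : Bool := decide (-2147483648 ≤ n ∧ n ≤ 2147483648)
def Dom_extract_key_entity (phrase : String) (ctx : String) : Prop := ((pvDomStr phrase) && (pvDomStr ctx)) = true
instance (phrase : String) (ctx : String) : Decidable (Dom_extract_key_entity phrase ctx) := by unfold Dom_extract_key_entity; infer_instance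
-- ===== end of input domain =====

-- B replaces A's two forward rescans by one right-to-left pass with a two-slot
-- accumulator (leftmost candidates survive by overwriting); objective: alternative.

-- shared primitive: w.rstrip('.,;'), exact (drops trailing '.', ',', ';' characters)
def pvRstrip (w : String) : String :=
  String.ofList ((w.toList.reverse.dropWhile (fun c => c == '.' || c == ',' || c == ';')).reverse)

def pvStopwords : List String :=
  ["the","a","an","this","that","these","those",
   "is","was","were","are","be","been","being",
   "had","has","have","did","do","does",
   "too","very","so","just","also","not",
   "and","or","but","for","with","from",
   "its","his","her","their","our","my","your",
   "in","on","at","to","of","by","as",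
   "it","he","she","they","who","which"]

-- ===== PORT A =====
-- first loop of A: first w with clean not a stopword, len > 2 and in ctx_words
def pvLoop1 (ws : List String) (ctxWords : PySem.Set String) : Option String :=
  match ws with
  | [] => none
  | w :: rest =>
    let wClean := pvRstrip w
    if !(pvStopwords.contains wClean) && decide (2 < PySem.Str.len wClean)
        && PySem.Set.contains ctxWords wClean then
      some wClean
    else pvLoop1 rest ctxWords

-- second loop of A: first w with clean not a stopword and len > 2
def pvLoop2 (ws : List String) : Option String :=
  match ws with
  | [] => none
  | w :: rest =>
    let wClean := pvRstrip w
    if !(pvStopwords.contains wClean) && decide (2 < PySem.Str.len wClean) then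
      some wClean
    else pvLoop2 rest

def extract_key_entity (phrase : String) (ctx : String) : String :=
  let ctxWords := PySem.Set.ofList (PySem.Str.split₀ (PySem.Str.lower ctx))
  let phraseWords := PySem.Str.split₀ (PySem.Str.lower phrase)
  match pvLoop1 phraseWords ctxWords with
  | some r => r
  | none =>
    match pvLoop2 phraseWords with
    | some r => r
    | none =>
      match phraseWords with
      | [] => ""
      | w :: _ => pvRstrip w

-- ===== PORT B =====
-- one step of B's backward loop: update (best_ctx, best_content) with word w
def pvStep (ctxWords : PySem.Set String) (s : Option String × Option String)
    (w : String) : Option String × Option String :=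
  let c := pvRstrip w
  if !(pvStopwords.contains c) && decide (2 < PySem.Str.len c) then
    ((if PySem.Set.contains ctxWords c then some c else s.1), some c)
  else s

def extract_key_entity_alt (phrase : String) (ctx : String) : String :=
  let ctxWords := PySem.Set.ofList (PySem.Str.split₀ (PySem.Str.lower ctx))
  let words := PySem.Str.split₀ (PySem.Str.lower phrase)
  let st := words.reverse.foldl (pvStep ctxWords) (none, none)
  match st.1 with
  | some r => r
  | none =>
    match st.2 with
    | some r => r
    | none =>
      match words with
      | [] => ""
      | w :: _ => pvRstrip w

-- ===== PRECONDITION & SPEC =====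
def Spec_extract_key_entity (phrase : String) (ctx : String) (out : String) : Prop := out = extract_key_entity_alt phrase ctx
instance (phrase : String) (ctx : String) (out : String) : Decidable (Spec_extract_key_entity phrase ctx out) := by unfold Spec_extract_key_entity; infer_instance

-- ===== CLAIM (what is proved, stated in full; the proofs are below) =====
def Claim_equal_extract_key_entity : Prop := ∀ (phrase : String) (ctx : String), Dom_extract_key_entity phrase ctx → Spec_extract_key_entity phrase ctx (extract_key_entity phrase ctx)

-- ===== LEMMAS AND PROOFS =====

-- the backward fold computes exactly (A's loop 1, A's loop 2)
theorem pvFold_eq (ws : List String) (cw : PySem.Set String) :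
    ws.reverse.foldl (pvStep cw) (none, none) = (pvLoop1 ws cw, pvLoop2 ws) := by
  induction ws with
  | nil => rfl
  | cons w rest ih =>
    have : (w :: rest).reverse = rest.reverse ++ [w] := by simp
    rw [this, List.foldl_append, ih]
    simp only [List.foldl_cons, List.foldl_nil, pvStep, pvLoop1, pvLoop2]
    cases h : (!pvStopwords.contains (pvRstrip w) && decide (2 < PySem.Str.len (pvRstrip w))) <;>
      cases h2 : PySem.Set.contains cw (pvRstrip w) <;>
        simp [h, h2]

-- ===== VERDICT (by name: the statement is the Claim_ definition above) =====
theorem extract_key_entity_spec : Claim_equal_extract_key_entity := by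
  intro phrase ctx _
  unfold Spec_extract_key_entity extract_key_entity extract_key_entity_alt
  simp only [pvFold_eq]
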